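-- pv_equiv track=rewrite | github.com/chowonje/knowledge-hub | eval/knowledgeos/scripts/collect_paper_default_eval.py | _citation_support_match
-- ===== SOURCE A (Python) =====
-- from typing import Any
--
-- def _clean_text(value: Any) -> str:
--     return str(value or "").strip()
--
-- def _normalize_eval_token(value: Any) -> str:
--     token = _clean_text(value).casefold()
--     token = " ".join(token.split())
--     return token
--
-- def _citation_support_match(payload: dict[str, Any]) -> str:
--     citations = [dict(item or {}) for item in list(payload.get("citations") or [])]
--     if not citations:
--         return ""
--     sources = [dict(item or {}) for item in list(payload.get("sources") or [])]
--     supported_targets = {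
--         _normalize_eval_token(
--             item.get("citation_target")
--             or item.get("arxiv_id")
--             or item.get("file_path")
--             or item.get("source_url")
--             or item.get("title")
--         )
--         for item in sources
--         if _normalize_eval_token(
--             item.get("citation_target")
--             or item.get("arxiv_id")
--             or item.get("file_path")
--             or item.get("source_url")
--             or item.get("title")
--         )
--     }
--     if not supported_targets:
--         return "0"
--     for citation in citations:
--         target = _normalize_eval_token(citation.get("target"))
--         if target and target not in supported_targets:
--             return "0"
--     return "1"
-- ===== SOURCE B (Python) =====
-- from typing import Any
--
-- def _clean_text(value: Any) -> str:
--     return str(value or "").strip()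
--
-- def _normalize_eval_token(value: Any) -> str:
--     token = _clean_text(value).casefold()
--     token = " ".join(token.split())
--     return token
--
-- def _source_token(item: dict) -> str:
--     return _normalize_eval_token(
--         item.get("citation_target")
--         or item.get("arxiv_id")
--         or item.get("file_path")
--         or item.get("source_url")
--         or item.get("title")
--     )
--
-- def _citation_support_match(payload: dict[str, Any]) -> str:
--     citations = [dict(item or {}) for item in list(payload.get("citations") or [])]
--     if not citations:
--         return ""
--     sources = [dict(item or {}) for item in list(payload.get("sources") or [])]
--     # demand-driven: collect the set of needed targets, then discharge them
--     # in a single pass over the sources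
--     needed = {t for t in (_normalize_eval_token(c.get("target")) for c in citations) if t}
--     has_valid = False
--     for item in sources:
--         token = _source_token(item)
--         if token:
--             has_valid = True
--             needed.discard(token)
--     if not has_valid:
--         return "0"
--     return "1" if not needed else "0"
-- ===== Notes on version B (the rewrite author's own statement) =====
-- stated objective: alternative
-- what changed: B inverts the direction of the check: instead of prebuilding the set of supported source targets and testing each citation against it, it collects the set of needed citation targets up front and discharges (set.discard) them in a single pass over the sources while recording whether any source yields a token; the answer is read off the final flag and the emptiness of the remaining demand set, with no per-citation loop.
import Mathlib
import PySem

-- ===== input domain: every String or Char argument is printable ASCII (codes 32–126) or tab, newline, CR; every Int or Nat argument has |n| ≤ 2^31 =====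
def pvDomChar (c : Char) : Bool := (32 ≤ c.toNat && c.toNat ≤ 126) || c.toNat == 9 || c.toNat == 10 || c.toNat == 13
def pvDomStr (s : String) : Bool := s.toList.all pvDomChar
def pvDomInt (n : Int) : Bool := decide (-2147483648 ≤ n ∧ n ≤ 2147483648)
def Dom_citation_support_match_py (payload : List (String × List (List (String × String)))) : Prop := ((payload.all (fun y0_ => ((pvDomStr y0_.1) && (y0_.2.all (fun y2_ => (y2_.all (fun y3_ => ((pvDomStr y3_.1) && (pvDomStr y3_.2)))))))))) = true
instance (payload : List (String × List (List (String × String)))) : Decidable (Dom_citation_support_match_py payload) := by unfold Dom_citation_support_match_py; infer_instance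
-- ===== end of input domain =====

-- B is demand-driven: it collects the set of needed citation targets and discharges them in a single pass over the sources, instead of A's prebuilt supported-target set checked per citation (alternative decomposition, same results).


-- shared module helpers (_clean_text / _normalize_eval_token and the source fallback chain, identical in both Pythons)
-- casefold is ported as PySem.Str.lower: exact on the ASCII domain Dom_ admits
def pvNormTok (v : Option String) : String :=
  PySem.Str.join " " (PySem.Str.split₀ (PySem.Str.lower (PySem.Str.strip (v.getD ""))))

-- Python string truthiness: non-empty
def pvTruthy (t : String) : Bool := t != ""

-- Python 'x or y': y when x is None or "" (falsy), else x
def pvOr (a b : Option String) : Option String :=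
  if a.getD "" = "" then b else a

def pvSrcRaw (item : List (String × String)) : Option String :=
  pvOr ((PySem.Dict.mk item).get? "citation_target")
    (pvOr ((PySem.Dict.mk item).get? "arxiv_id")
      (pvOr ((PySem.Dict.mk item).get? "file_path")
        (pvOr ((PySem.Dict.mk item).get? "source_url")
          ((PySem.Dict.mk item).get? "title"))))

def pvSrcTok (item : List (String × String)) : String := pvNormTok (pvSrcRaw item)

-- _normalize_eval_token(citation.get("target"))
def pvTgt (c : List (String × String)) : String :=
  pvNormTok ((PySem.Dict.mk c).get? "target")

-- ===== PORT A =====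
-- the for-loop over citations with early 'return "0"' against the prebuilt set
def pvLoopA (cs : List (List (String × String))) (supported : PySem.Set String) : String :=
  match cs with
  | [] => "1"
  | c :: rest =>
    let target := pvTgt c
    if pvTruthy target && !(PySem.Set.contains supported target) then "0"
    else pvLoopA rest supported

def citation_support_match_py (payload : List (String × List (List (String × String)))) : String :=
  let citations := ((PySem.Dict.mk payload).get? "citations").getD []
  if citations.isEmpty then ""
  else
    let sources := ((PySem.Dict.mk payload).get? "sources").getD []
    let supported : PySem.Set String :=
      PySem.Set.ofList ((sources.map pvSrcTok).filter pvTruthy)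
    if supported.isEmpty then "0"
    else pvLoopA citations supported

-- ===== PORT B =====
-- B's single pass over the sources: record whether any source yields a token,
-- and discard every produced token from the set of still-needed targets
def pvStep (st : Bool × PySem.Set String) (item : List (String × String)) :
    Bool × PySem.Set String :=
  if pvTruthy (pvSrcTok item) then (true, PySem.Set.discard st.2 (pvSrcTok item)) else st

def citation_support_match_py_alt (payload : List (String × List (List (String × String)))) : String :=
  let citations := ((PySem.Dict.mk payload).get? "citations").getD []
  if citations.isEmpty then ""
  else
    let sources := ((PySem.Dict.mk payload).get? "sources").getD []
    -- needed = {t for t in (normalize(c.get("target")) for c in citations) if t}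
    let needed : PySem.Set String :=
      PySem.Set.ofList ((citations.map pvTgt).filter pvTruthy)
    let st := sources.foldl pvStep (false, needed)
    if !st.1 then "0"
    else if st.2.isEmpty then "1" else "0"

-- ===== PRECONDITION & SPEC =====
def Spec_citation_support_match_py (payload : List (String × List (List (String × String)))) (out : String) : Prop := out = citation_support_match_py_alt payload
instance (payload : List (String × List (List (String × String)))) (out : String) : Decidable (Spec_citation_support_match_py payload out) := by unfold Spec_citation_support_match_py; infer_instance

-- ===== CLAIM (what is proved, stated in full; the proofs are below) =====
def Claim_equal_citation_support_match_py : Prop := ∀ (payload : List (String × List (List (String × String)))), Dom_citation_support_match_py payload → Spec_citation_support_match_py payload (citation_support_match_py payload)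

-- ===== LEMMAS AND PROOFS =====

-- membership in A's set of non-empty source tokens (for a non-empty t)
theorem pv_mem_supported (sources : List (List (String × String))) (t : String) (ht : t ≠ "") :
    t ∈ PySem.Set.ofList ((sources.map pvSrcTok).filter pvTruthy)
      ↔ ∃ item ∈ sources, pvSrcTok item = t := by
  rw [PySem.Set.mem_ofList, List.mem_filter]
  constructor
  · rintro ⟨hm, _⟩
    obtain ⟨item, hmem, heq⟩ := List.mem_map.mp hm
    exact ⟨item, hmem, heq⟩
  · rintro ⟨item, hmem, heq⟩
    exact ⟨List.mem_map.mpr ⟨item, hmem, heq⟩, by simp [pvTruthy, ht]⟩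

-- A's set is empty iff no source yields a non-empty token
theorem pv_isEmpty_eq (sources : List (List (String × String))) :
    (PySem.Set.ofList ((sources.map pvSrcTok).filter pvTruthy)).isEmpty
      = !(sources.any (fun item => pvTruthy (pvSrcTok item))) := by
  rcases h : sources.any (fun item => pvTruthy (pvSrcTok item)) with _ | _
  · rw [List.any_eq_false] at h
    have hfil : (sources.map pvSrcTok).filter pvTruthy = [] := by
      rw [List.filter_eq_nil_iff]
      intro t htm
      obtain ⟨item, hmem, heq⟩ := List.mem_map.mp htm
      rw [← heq]
      simpa using h item hmem
    rw [hfil]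
    rfl
  · rw [List.any_eq_true] at h
    obtain ⟨item, hmem, heq⟩ := h
    simp only [Bool.not_true, List.isEmpty_eq_false_iff_exists_mem]
    refine ⟨pvSrcTok item, ?_⟩
    rw [PySem.Set.mem_ofList, List.mem_filter]
    exact ⟨List.mem_map.mpr ⟨item, hmem, rfl⟩, heq⟩

-- A's citation loop, characterised: "0" iff some citation has a non-empty target outside the set
theorem pvLoopA_eq (cs : List (List (String × String))) (S : PySem.Set String) :
    pvLoopA cs S
      = if cs.any (fun c => pvTruthy (pvTgt c) && !(PySem.Set.contains S (pvTgt c)))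
        then "0" else "1" := by
  induction cs with
  | nil => rfl
  | cons c rest ih =>
    have hstep : pvLoopA (c :: rest) S
        = if (pvTruthy (pvTgt c) && !(PySem.Set.contains S (pvTgt c))) = true
          then "0" else pvLoopA rest S := rfl
    rw [hstep, List.any_cons, ih]
    by_cases h : (pvTruthy (pvTgt c) && !(PySem.Set.contains S (pvTgt c))) = true
    · rw [h, Bool.true_or]
      rfl
    · rw [Bool.not_eq_true] at h
      rw [h, Bool.false_or, if_neg (by simp)]

-- the first component of B's fold: whether any source produced a token
theorem pv_fold_fst (sources : List (List (String × String))) (hv : Bool) (nd : PySem.Set String) :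
    (sources.foldl pvStep (hv, nd)).1
      = (hv || sources.any (fun item => pvTruthy (pvSrcTok item))) := by
  induction sources generalizing hv nd with
  | nil => simp
  | cons s rest ih =>
    simp only [List.foldl_cons, List.any_cons, pvStep]
    split
    · rw [ih]
      simp [*]
    · rw [ih]
      rename_i h
      rw [Bool.not_eq_true] at h
      simp [h]

-- membership in the second component of B's fold
theorem pv_fold_mem (sources : List (List (String × String))) (hv : Bool)
    (nd : PySem.Set String) (t : String) :
    t ∈ (sources.foldl pvStep (hv, nd)).2
      ↔ t ∈ nd ∧ ∀ item ∈ sources, pvTruthy (pvSrcTok item) → pvSrcTok item ≠ t := by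
  induction sources generalizing hv nd with
  | nil => simp
  | cons s rest ih =>
    simp only [List.foldl_cons, pvStep]
    split
    · rename_i h
      rw [ih, PySem.Set.mem_discard]
      constructor
      · rintro ⟨⟨h1, h2⟩, h3⟩
        refine ⟨h1, ?_⟩
        intro item hmem
        rcases List.mem_cons.mp hmem with rfl | hmem'
        · exact fun _ he => h2 he.symm
        · exact h3 item hmem'
      · rintro ⟨h1, h2⟩
        exact ⟨⟨h1, fun he => h2 s (List.mem_cons_self) h he.symm⟩,
          fun item hmem => h2 item (List.mem_cons_of_mem _ hmem)⟩
    · rename_i h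
      rw [Bool.not_eq_true] at h
      rw [ih]
      constructor
      · rintro ⟨h1, h2⟩
        refine ⟨h1, ?_⟩
        intro item hmem
        rcases List.mem_cons.mp hmem with rfl | hmem'
        · intro htr
          rw [h] at htr
          cases htr
        · exact h2 item hmem'
      · rintro ⟨h1, h2⟩
        exact ⟨h1, fun item hmem => h2 item (List.mem_cons_of_mem _ hmem)⟩

-- B's final needed-set is empty iff A's loop finds no unsupported citation
theorem pv_needed_empty (cits sources : List (List (String × String))) :
    ((sources.foldl pvStep
        (false, PySem.Set.ofList ((cits.map pvTgt).filter pvTruthy))).2).isEmpty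
      = !(cits.any (fun c => pvTruthy (pvTgt c)
            && !(PySem.Set.contains
                  (PySem.Set.ofList ((sources.map pvSrcTok).filter pvTruthy)) (pvTgt c)))) := by
  rw [Bool.eq_iff_iff, List.isEmpty_iff, List.eq_nil_iff_forall_not_mem,
    Bool.not_eq_true', List.any_eq_false]
  constructor
  · intro hempty c hc
    rcases ht : pvTruthy (pvTgt c) with _ | _
    · simp [ht]
    · have htne : pvTgt c ≠ "" := by simpa [pvTruthy] using ht
      have hmem : pvTgt c ∈ PySem.Set.ofList ((cits.map pvTgt).filter pvTruthy) := by
        rw [PySem.Set.mem_ofList, List.mem_filter]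
        exact ⟨List.mem_map.mpr ⟨c, hc, rfl⟩, ht⟩
      have h1 := hempty (pvTgt c)
      rw [pv_fold_mem] at h1
      push_neg at h1
      obtain ⟨item, hitem, ht2, heq⟩ := h1 hmem
      have hS : pvTgt c ∈ PySem.Set.ofList ((sources.map pvSrcTok).filter pvTruthy) :=
        (pv_mem_supported sources _ htne).mpr ⟨item, hitem, heq⟩
      have hcont : PySem.Set.contains
          (PySem.Set.ofList ((sources.map pvSrcTok).filter pvTruthy)) (pvTgt c) = true :=
        (PySem.Set.contains_iff _ _).mpr hS
      rw [hcont]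
      simp
  · intro hall t hmem
    rw [pv_fold_mem] at hmem
    obtain ⟨hmem0, hnone⟩ := hmem
    rw [PySem.Set.mem_ofList, List.mem_filter] at hmem0
    obtain ⟨hmap, htr⟩ := hmem0
    obtain ⟨c, hc, heq⟩ := List.mem_map.mp hmap
    have htne : t ≠ "" := by simpa [pvTruthy] using htr
    have hbad := hall c hc
    rw [heq, htr] at hbad
    have hb2 : PySem.Set.contains
        (PySem.Set.ofList ((sources.map pvSrcTok).filter pvTruthy)) t = true := by
      cases hcc : PySem.Set.contains
          (PySem.Set.ofList ((sources.map pvSrcTok).filter pvTruthy)) t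
      · rw [hcc] at hbad
        exact absurd rfl hbad
      · rfl
    obtain ⟨item, hitem, heq2⟩ :=
      (pv_mem_supported sources t htne).mp ((PySem.Set.contains_iff _ _).mp hb2)
    exact hnone item hitem (by rw [heq2]; exact htr) heq2

-- the final Boolean case split shared by both result shapes
theorem pv_ifchain (hv bb : Bool) :
    (if (!hv) = true then "0" else if bb = true then "0" else "1")
      = (if (!hv) = true then "0" else if (!bb) = true then "1" else "0") := by
  cases hv <;> cases bb <;> rfl

-- ===== VERDICT (by name: the statement is the Claim_ definition above) =====
theorem citation_support_match_py_spec : Claim_equal_citation_support_match_py := by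
  intro payload _
  unfold Spec_citation_support_match_py citation_support_match_py citation_support_match_py_alt
  rcases ((PySem.Dict.mk payload).get? "citations").getD [] with _ | ⟨c, cs⟩
  · rfl
  · simp only [List.isEmpty_cons, if_false, Bool.false_eq_true]
    rw [pv_isEmpty_eq, pv_fold_fst, Bool.false_or, pv_needed_empty, pvLoopA_eq]
    exact pv_ifchain _ _
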